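-- pv_equiv track=rewrite | github.com/rbp/advent-of-code-2024 | day05/pages.py | fix_order
-- ===== SOURCE A (Python) =====
-- from collections import defaultdict
--
-- def fix_order(ordering, updates):
--     cannot_after = defaultdict(set)
--     for before, after in ordering:
--         cannot_after[after].add(before)
--
--     mid_sum = 0
--     for update in updates:
--         fixed = False
--         i = 0
--         while i < len(update):
--             page = update[i]
--             j = i+1
--             while j < len(update):
--                 if update[j] in cannot_after[page]:
--                     fixed = True
--                     # I could also swap update[i] and update[j]. More CompSci, and would work.
--                     # Also avoids shifing the entire list.
--                     update[i:i] = [update.pop(j)]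
--                     break
--                 j += 1
--             else:
--                 i += 1
--         if fixed:
--             mid_sum += int(update[len(update)//2])
--     return mid_sum
-- ===== SOURCE B (Python) =====
-- def fix_order(ordering, updates):
--     # DFS with an explicit stack over "must-come-before" edges; does not mutate the inputs
--     pairs = {(b, a) for b, a in ordering}
--     total = 0
--     for update in updates:
--         out = []
--         stack = []
--         remaining = list(update)
--         changed = False
--         while stack or remaining:
--             if not stack:
--                 stack.append(remaining.pop(0))
--                 continue
--             t = stack[-1]
--             for k, y in enumerate(remaining):
--                 if (y, t) in pairs:
--                     stack.append(remaining.pop(k))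
--                     changed = True
--                     break
--             else:
--                 out.append(stack.pop())
--         if changed:
--             total += out[len(out) // 2]
--     return total
-- ===== Notes on version B (the rewrite author's own statement) =====
-- stated objective: alternative
-- what changed: A repeatedly splices the first out-of-order page back to the current position of a mutated list and rescans; B runs a depth-first search with an explicit stack over the must-come-before edges, pushing each page's first remaining blocker and emitting pages as their stacks unwind, without mutating the input.
import Mathlib
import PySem

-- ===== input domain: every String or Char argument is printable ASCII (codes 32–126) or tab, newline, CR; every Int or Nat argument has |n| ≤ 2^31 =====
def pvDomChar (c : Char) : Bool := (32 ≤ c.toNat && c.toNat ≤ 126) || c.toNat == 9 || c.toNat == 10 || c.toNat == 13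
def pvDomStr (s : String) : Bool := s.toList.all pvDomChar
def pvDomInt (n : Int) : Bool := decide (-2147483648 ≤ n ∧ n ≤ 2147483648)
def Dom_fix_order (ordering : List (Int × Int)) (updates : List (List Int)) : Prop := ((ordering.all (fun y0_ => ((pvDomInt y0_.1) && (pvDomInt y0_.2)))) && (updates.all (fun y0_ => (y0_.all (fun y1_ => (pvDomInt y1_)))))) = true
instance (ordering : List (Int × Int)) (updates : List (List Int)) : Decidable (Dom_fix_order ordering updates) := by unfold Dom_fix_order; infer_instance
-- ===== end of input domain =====

-- B replaces A's splice-first-blocker-back-and-rescan loop on a mutated list by a DFS with an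
-- explicit stack over the must-come-before edges (objective: alternative algorithm, similar cost).
-- A reorders each update list in place in Python; the equivalence proved here is about the return
-- value only (B does not mutate its arguments).

-- ===== PORT A =====
-- cannot_after = defaultdict(set); for before, after in ordering: cannot_after[after].add(before)
def buildCA (ordering : List (Int × Int)) : PySem.Dict Int (PySem.Set Int) :=
  ordering.foldl
    (fun d p => d.insert p.2 (PySem.Set.add (d.getD p.2 PySem.Set.empty) p.1))
    PySem.Dict.empty

-- the inner 'while j < len(update)' scan: first element of the suffix that is in cannot_after[page],
-- together with the suffix with that occurrence removed ('update.pop(j)')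
def popBlocker (ca : PySem.Dict Int (PySem.Set Int)) (page : Int) : List Int → Option (Int × List Int)
  | [] => none
  | z :: zs =>
      if z ∈ ca.getD page PySem.Set.empty then some (z, zs)
      else (popBlocker ca page zs).map (fun p => (p.1, z :: p.2))

-- the outer 'while i < len(update)' loop; the list is kept as (done = update[:i], suffix = update[i:]),
-- 'update[i:i] = [update.pop(j)]' puts the popped blocker at the head of the suffix.
-- fuel makes the loop total (the Python loop diverges on ordering cycles, excluded by Pre_ below);
-- 2*len+1 steps are proved sufficient under Pre_.
def loopA (ca : PySem.Dict Int (PySem.Set Int)) :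
    Nat → List Int → List Int → Bool → (List Int × Bool)
  | 0, done, suffix, fixed => (done ++ suffix, fixed)
  | _ + 1, done, [], fixed => (done, fixed)
  | fuel + 1, done, page :: s, fixed =>
      match popBlocker ca page s with
      | some (y, s') => loopA ca fuel done (y :: page :: s') true
      | none => loopA ca fuel (done ++ [page]) s fixed

def fix_order (ordering : List (Int × Int)) (updates : List (List Int)) : Int :=
  let ca := buildCA ordering
  updates.foldl
    (fun mid_sum update =>
      let r := loopA ca (2 * update.length + 1) [] update false
      if r.2 then mid_sum + r.1.getD (r.1.length / 2) 0 else mid_sum)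
    0

-- ===== PORT B =====
-- pairs = {(b, a) for b, a in ordering}
def blockerPairs (ordering : List (Int × Int)) : PySem.Set (Int × Int) :=
  PySem.Set.ofList ordering

-- 'for k, y in enumerate(remaining): if (y, t) in pairs: remaining.pop(k)'
def findPull (bl : PySem.Set (Int × Int)) (t : Int) : List Int → Option (Int × List Int)
  | [] => none
  | y :: ys =>
      if (y, t) ∈ bl then some (y, ys)
      else (findPull bl t ys).map (fun p => (p.1, y :: p.2))

theorem findPull_some_length (bl : PySem.Set (Int × Int)) (t : Int) :
    ∀ (l : List Int) (p : Int × List Int), findPull bl t l = some p → p.2.length + 1 = l.length := by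
  intro l
  induction l with
  | nil => intro p h; simp [findPull] at h
  | cons y ys ih =>
      intro p h
      simp only [findPull] at h
      split at h
      · cases h; simp
      · cases hf : findPull bl t ys with
        | none => rw [hf] at h; simp at h
        | some q => rw [hf] at h; cases h; simpa using ih q hf

-- the DFS loop: out = settled pages, stack = chain of pages waiting on their blockers, remaining =
-- untouched pages in input order
def loopB (bl : PySem.Set (Int × Int)) :
    List Int → List Int → List Int → Bool → (List Int × Bool)
  | out, [], [], changed => (out, changed)
  | out, [], r :: rs, changed => loopB bl out [r] rs changed
  | out, t :: st, remaining, changed =>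
      match h : findPull bl t remaining with
      | some (y, rest) => loopB bl out (y :: t :: st) rest true
      | none => loopB bl (out ++ [t]) st remaining changed
  termination_by _ stack remaining _ => 2 * remaining.length + stack.length
  decreasing_by
  all_goals simp_wf
  all_goals try (have := findPull_some_length bl t remaining (y, rest) h; simp at this)
  all_goals omega

def fix_order_alt (ordering : List (Int × Int)) (updates : List (List Int)) : Int :=
  let bl := blockerPairs ordering
  updates.foldl
    (fun total update =>
      let r := loopB bl [] [] update false
      if r.2 then total + r.1.getD (r.1.length / 2) 0 else total)
    0

-- ===== PRECONDITION & SPEC =====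
-- helpers for Pre_: the must-come-before graph restricted to the values of one update (a self-edge
-- counts only if the value occurs at least twice), and bounded reachability over it
def succsP (ordering : List (Int × Int)) (u V : List Int) (v : Int) : List Int :=
  V.filter (fun w => decide ((v, w) ∈ ordering) && (!(v == w) || decide (2 ≤ u.count v)))

def reachN (ordering : List (Int × Int)) (u V : List Int) : Nat → List Int → List Int
  | 0, S => S
  | n + 1, S => reachN ordering u V n ((S ++ S.flatMap (succsP ordering u V)).dedup)

def acyclicU (ordering : List (Int × Int)) (u : List Int) : Bool :=
  (u.dedup).all (fun v =>
    !decide (v ∈ reachN ordering u u.dedup (u.dedup).length (succsP ordering u u.dedup v)))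

-- Pre_ excludes exactly the inputs on which A diverges: a must-come-before cycle among the values of
-- some update makes A's splice-to-front loop repeat forever, so A never returns there.
def Pre_fix_order (ordering : List (Int × Int)) (updates : List (List Int)) : Prop :=
  (updates.all (fun u => acyclicU ordering u)) = true

instance (ordering : List (Int × Int)) (updates : List (List Int)) :
    Decidable (Pre_fix_order ordering updates) := by unfold Pre_fix_order; infer_instance

def pvWitness_fix_order : (List (Int × Int)) × List (List Int) :=
  ([(47, 53), (97, 13), (75, 29)], [[75, 47, 61, 53, 29], [97, 13, 75, 29, 47]])

def Spec_fix_order (ordering : List (Int × Int)) (updates : List (List Int)) (out : Int) : Prop :=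
  out = fix_order_alt ordering updates
instance (ordering : List (Int × Int)) (updates : List (List Int)) (out : Int) :
    Decidable (Spec_fix_order ordering updates out) := by unfold Spec_fix_order; infer_instance

-- ===== CLAIM (what is proved, stated in full; the proofs are below) =====
def Claim_equal_fix_order : Prop :=
  ∀ (ordering : List (Int × Int)) (updates : List (List Int)),
    Dom_fix_order ordering updates → Pre_fix_order ordering updates →
      Spec_fix_order ordering updates (fix_order ordering updates)

-- ===== LEMMAS AND PROOFS =====

theorem mem_succsP (ord : List (Int × Int)) (u V : List Int) (v w : Int) :
    w ∈ succsP ord u V v ↔ w ∈ V ∧ (v, w) ∈ ord ∧ (v ≠ w ∨ 2 ≤ u.count v) := by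
  simp [succsP]

theorem reach_succ_mono (ord : List (Int × Int)) (u V : List Int) :
    ∀ (n : Nat) (S : List Int), reachN ord u V n S ⊆ reachN ord u V (n + 1) S := by
  intro n
  induction n with
  | zero =>
      intro S x hx
      simp only [reachN] at hx ⊢
      simp [List.mem_dedup, hx]
  | succ n ih =>
      intro S
      show reachN ord u V (n+1) S ⊆ reachN ord u V (n+2) S
      simp only [reachN]
      exact ih _

theorem reach_mono_fuel (ord : List (Int × Int)) (u V : List Int) {m n : Nat}
    (h : m ≤ n) (S : List Int) : reachN ord u V m S ⊆ reachN ord u V n S := by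
  induction n with
  | zero => have : m = 0 := by omega
            subst this; exact fun x hx => hx
  | succ n ih =>
      rcases Nat.lt_or_ge m (n+1) with h' | h'
      · exact fun x hx => reach_succ_mono ord u V n S (ih (by omega) hx)
      · have : m = n + 1 := by omega
        subst this; exact fun x hx => hx

theorem pathReach (ord : List (Int × Int)) (u V : List Int) :
    ∀ (st : List Int) (t : Int) (S : List Int), t ∈ S →
      List.IsChain (fun a b => b ∈ succsP ord u V a) (t :: st) →
      ∀ z ∈ t :: st, z ∈ reachN ord u V st.length S := by
  intro st
  induction st with
  | nil =>
      intro t S ht _ z hz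
      simp at hz; subst hz
      simpa [reachN] using ht
  | cons b st' ih =>
      intro t S ht hch z hz
      rw [List.isChain_cons_cons] at hch
      have hb : b ∈ (S ++ S.flatMap (succsP ord u V)).dedup := by
        simp only [List.mem_dedup, List.mem_append, List.mem_flatMap]
        exact Or.inr ⟨t, ht, hch.1⟩
      rcases List.mem_cons.mp hz with rfl | hz'
      · exact reach_mono_fuel ord u V (Nat.zero_le _) S (by simpa [reachN] using ht)
      · have := ih b ((S ++ S.flatMap (succsP ord u V)).dedup) hb hch.2 z hz'
        simpa [reachN] using this

theorem no_back_edge (ord : List (Int × Int)) (u : List Int)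
    (hacyc : acyclicU ord u = true) (t : Int) (st : List Int) (z : Int)
    (hch : List.IsChain (fun a b => b ∈ succsP ord u u.dedup a) (t :: st))
    (hnd : (t :: st).Nodup)
    (hsub : ∀ x ∈ t :: st, x ∈ u.dedup)
    (hz : z ∈ t :: st)
    (hedge : t ∈ succsP ord u u.dedup z) : False := by
  have hzr : z ∈ reachN ord u u.dedup st.length (succsP ord u u.dedup z) :=
    pathReach ord u u.dedup st t (succsP ord u u.dedup z) hedge hch z hz
  have hlen : (t :: st).length ≤ u.dedup.length :=
    ((List.subperm_of_subset hnd hsub)).length_le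
  have hzr' : z ∈ reachN ord u u.dedup u.dedup.length (succsP ord u u.dedup z) :=
    reach_mono_fuel ord u u.dedup (by simp at hlen; omega) _ hzr
  simp only [acyclicU, List.all_eq_true] at hacyc
  exact absurd hzr' (by simpa using hacyc z (hsub z hz))

theorem buildCA_mem (z t : Int) :
    ∀ (ord : List (Int × Int)) (d : PySem.Dict Int (PySem.Set Int)),
      (z ∈ (ord.foldl
        (fun d p => d.insert p.2 (PySem.Set.add (d.getD p.2 PySem.Set.empty) p.1)) d).getD t PySem.Set.empty)
      ↔ ((z, t) ∈ ord ∨ z ∈ d.getD t PySem.Set.empty) := by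
  intro ord
  induction ord with
  | nil => simp
  | cons p rest ih =>
      intro d
      simp only [List.foldl_cons]
      rw [ih]
      rw [PySem.Dict.getD_insert]
      by_cases ht : t = p.2
      · subst ht
        simp [PySem.Set.mem_add, Prod.ext_iff]
        try tauto
      · simp [ht, Prod.ext_iff]
        try tauto

theorem mem_CA_iff (ord : List (Int × Int)) (z t : Int) :
    z ∈ (buildCA ord).getD t PySem.Set.empty ↔ (z, t) ∈ ord := by
  rw [buildCA, buildCA_mem]
  simp [PySem.Dict.getD_empty, PySem.Set.empty]

theorem popBlocker_eq_findPull (ord : List (Int × Int)) (t : Int) :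
    ∀ l : List Int, popBlocker (buildCA ord) t l = findPull (blockerPairs ord) t l := by
  intro l
  induction l with
  | nil => simp [popBlocker, findPull]
  | cons z zs ih =>
      have hiff : (z ∈ (buildCA ord).getD t PySem.Set.empty) ↔ ((z, t) ∈ blockerPairs ord) := by
        rw [mem_CA_iff, blockerPairs, PySem.Set.mem_ofList]
      by_cases hz : z ∈ (buildCA ord).getD t PySem.Set.empty
      · simp only [popBlocker, findPull]
        rw [if_pos hz, if_pos (hiff.mp hz)]
      · simp only [popBlocker, findPull]
        rw [if_neg hz, if_neg (fun h => hz (hiff.mpr h)), ih]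

theorem findPull_some (bl : PySem.Set (Int × Int)) (t : Int) :
    ∀ (l : List Int) (y : Int) (r : List Int), findPull bl t l = some (y, r) →
      l.Perm (y :: r) ∧ (y, t) ∈ bl := by
  intro l
  induction l with
  | nil => intro y r h; simp [findPull] at h
  | cons a as ih =>
      intro y r h
      simp only [findPull] at h
      split at h
      · rename_i hmem
        cases h
        exact ⟨List.Perm.refl _, hmem⟩
      · cases hf : findPull bl t as with
        | none => rw [hf] at h; simp at h
        | some q =>
            rw [hf] at h
            simp only [Option.map_some] at h
            cases h
            obtain ⟨hp, hb⟩ := ih q.1 q.2 (by rw [hf])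
            constructor
            · exact (hp.cons a).trans (List.Perm.swap q.1 a q.2)
            · exact hb

theorem findPull_append_of_no (bl : PySem.Set (Int × Int)) (t : Int) :
    ∀ (st rem : List Int), (∀ z ∈ st, (z, t) ∉ bl) →
      findPull bl t (st ++ rem) = (findPull bl t rem).map (fun p => (p.1, st ++ p.2)) := by
  intro st
  induction st with
  | nil => intro rem _; cases hf : findPull bl t rem <;> simp [hf]
  | cons z st' ih =>
      intro rem h
      simp only [List.cons_append, findPull]
      rw [if_neg (h z (by simp)), ih rem (fun w hw => h w (by simp [hw]))]
      cases hf : findPull bl t rem <;> simp [hf]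

theorem bisim (ord : List (Int × Int)) (u : List Int) (hacyc : acyclicU ord u = true) :
    ∀ (μ : Nat) (stack rem out : List Int) (fixed : Bool) (fuel : Nat),
      2 * rem.length + stack.length = μ → μ + 1 ≤ fuel →
      List.IsChain (fun a b => b ∈ succsP ord u u.dedup a) stack →
      stack.Nodup → List.Subperm (stack ++ rem) u →
      loopA (buildCA ord) fuel out (stack ++ rem) fixed =
        loopB (blockerPairs ord) out stack rem fixed := by
  intro μ
  induction μ using Nat.strong_induction_on with
  | _ μ ih =>
    intro stack rem out fixed fuel hμ hfuel hch hnd hsp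
    obtain ⟨f, rfl⟩ : ∃ f, fuel = f + 1 := ⟨fuel - 1, by omega⟩
    match stack, rem with
    | [], [] => simp [loopA, loopB]
    | [], r :: rs =>
        rw [show loopB (blockerPairs ord) out [] (r :: rs) fixed
              = loopB (blockerPairs ord) out [r] rs fixed from by rw [loopB]]
        rw [show (([] : List Int) ++ r :: rs) = ([r] ++ rs) from by simp]
        exact ih (2 * rs.length + 1) (by simp at hμ; omega) [r] rs out fixed (f + 1) (by simp)
          (by simp at hμ; omega) (List.IsChain.singleton r) (List.nodup_singleton r)
          (by simpa using hsp)
    | t :: st, rem =>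
        have hstV : ∀ x ∈ t :: st, x ∈ u.dedup := by
          intro x hx
          rw [List.mem_dedup]
          apply hsp.subset
          simp only [List.cons_append, List.mem_cons, List.mem_append] at hx ⊢
          tauto
        have hnost : ∀ z ∈ st, (z, t) ∉ blockerPairs ord := by
          intro z hz hpair
          have hzt : z ≠ t := by
            intro h; subst h
            exact (List.nodup_cons.mp hnd).1 hz
          have hedge : t ∈ succsP ord u u.dedup z := by
            rw [mem_succsP]
            exact ⟨hstV t (by simp), by
              rwa [blockerPairs, PySem.Set.mem_ofList] at hpair, Or.inl hzt⟩
          exact no_back_edge ord u hacyc t st z hch hnd hstV (by simp [hz]) hedge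
        have hsplit : popBlocker (buildCA ord) t (st ++ rem)
            = (findPull (blockerPairs ord) t rem).map (fun p => (p.1, st ++ p.2)) := by
          rw [popBlocker_eq_findPull, findPull_append_of_no _ _ _ _ hnost]
        cases hf : findPull (blockerPairs ord) t rem with
        | none =>
            rw [show ((t :: st) ++ rem) = (t :: (st ++ rem)) from by simp]
            simp only [loopA, hsplit, hf, Option.map_none]
            rw [show loopB (blockerPairs ord) out (t :: st) rem fixed
                  = loopB (blockerPairs ord) (out ++ [t]) st rem fixed from by
              rw [loopB, hf]]
            exact ih (μ - 1) (by simp only [List.length_cons] at hμ; omega) st rem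
              (out ++ [t]) fixed f (by simp only [List.length_cons] at hμ; omega)
              (by simp only [List.length_cons] at hμ; omega) hch.of_cons (List.nodup_cons.mp hnd).2
              (((st ++ rem).sublist_cons_self t).subperm.trans hsp)
        | some p =>
            obtain ⟨y, rest⟩ := p
            obtain ⟨hperm, hpair⟩ := findPull_some (blockerPairs ord) t rem y rest hf
            have hylen : rest.length + 1 = rem.length := by
              simpa using hperm.length_eq.symm
            have hyrem : y ∈ rem := hperm.mem_iff.mpr (by simp)
            have htu : t ∈ u := hsp.subset (by simp)
            have hyu : y ∈ u := hsp.subset (by simp [hyrem])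
            have hedgeyt : t ∈ succsP ord u u.dedup y := by
              rw [mem_succsP]
              refine ⟨hstV t (by simp), by rwa [blockerPairs, PySem.Set.mem_ofList] at hpair, ?_⟩
              by_cases hyt : y = t
              · subst hyt
                right
                have hc : (y :: st ++ rem).count y ≤ u.count y := hsp.count_le y
                have h1 : 0 < rem.count y := List.count_pos_iff.mpr hyrem
                simp [List.count_append] at hc
                omega
              · exact Or.inl hyt
            have hynotin : y ∉ t :: st := by
              intro hy
              exact no_back_edge ord u hacyc t st y hch hnd hstV hy hedgeyt
            have hperm2 : ((y :: t :: st) ++ rest).Perm ((t :: st) ++ rem) := by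
              have h1 : ((t :: st) ++ rem).Perm ((t :: st) ++ (y :: rest)) :=
                List.Perm.append_left _ hperm
              have h2 : (y :: ((t :: st) ++ rest)).Perm ((t :: st) ++ (y :: rest)) :=
                List.perm_middle.symm
              exact h2.trans h1.symm
            rw [show ((t :: st) ++ rem) = (t :: (st ++ rem)) from by simp]
            simp only [loopA, hsplit, hf, Option.map_some]
            rw [show loopB (blockerPairs ord) out (t :: st) rem fixed
                  = loopB (blockerPairs ord) out (y :: t :: st) rest true from by
              rw [loopB, hf]]
            rw [show (y :: t :: (st ++ rest)) = ((y :: t :: st) ++ rest) from by simp]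
            exact ih (μ - 1) (by simp only [List.length_cons] at hμ; omega) (y :: t :: st)
              rest out true f (by simp only [List.length_cons] at hμ ⊢; omega)
              (by simp only [List.length_cons] at hμ; omega)
              (List.isChain_cons_cons.mpr ⟨hedgeyt, hch⟩)
              (List.nodup_cons.mpr ⟨hynotin, hnd⟩)
              (hperm2.subperm.trans hsp)

theorem loop_eq (ord : List (Int × Int)) (u : List Int) (hacyc : acyclicU ord u = true) :
    loopA (buildCA ord) (2 * u.length + 1) [] u false
      = loopB (blockerPairs ord) [] [] u false := by
  have := bisim ord u hacyc (2 * u.length) [] u [] false (2 * u.length + 1)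
    (by simp) (by omega) List.IsChain.nil List.nodup_nil (by simpa using List.Subperm.refl u)
  simpa using this

theorem fold_eq (ord : List (Int × Int)) :
    ∀ (ups : List (List Int)) (acc : Int), (∀ u ∈ ups, acyclicU ord u = true) →
      ups.foldl (fun mid_sum update =>
          let r := loopA (buildCA ord) (2 * update.length + 1) [] update false
          if r.2 then mid_sum + r.1.getD (r.1.length / 2) 0 else mid_sum) acc
      = ups.foldl (fun total update =>
          let r := loopB (blockerPairs ord) [] [] update false
          if r.2 then total + r.1.getD (r.1.length / 2) 0 else total) acc := by
  intro ups
  induction ups with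
  | nil => intro acc _; rfl
  | cons u rest ih =>
      intro acc h
      simp only [List.foldl_cons]
      rw [loop_eq ord u (h u (by simp))]
      exact ih _ (fun v hv => h v (by simp [hv]))

-- ===== VERDICT (by name: the statement is the Claim_ definition above) =====
theorem fix_order_spec : Claim_equal_fix_order := by
  intro ordering updates _ hpre
  unfold Spec_fix_order fix_order fix_order_alt
  simp only [Pre_fix_order, List.all_eq_true] at hpre
  exact fold_eq ordering updates 0 hpre
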